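-- pv_equiv track=rewrite | github.com/liskos/jakov | учебаsh.py | f
-- ===== SOURCE A (Python) =====
-- def f(a,b,k=0):
--     if a == b:
--         return 1
--     if a > b:
--         return 0
--     if k == 1:
--         return f(a*3,b,k-1)
--     return f(a+1,b)+f(a*2,b,k+1)+f(a*3,b)
-- ===== SOURCE B (Python) =====
-- def f(a, b, k=0):
--     if a == b:
--         return 1
--     if a > b:
--         return 0
--     # g[y] = number of op-sequences (+1, *2, *3) leading from y to b in the
--     # unrestricted state (k == 0), computed bottom-up for y in (a, b].
--     g = {b: 1}
--     for y in range(b - 1, a, -1):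
--         t = g[y + 1] + g.get(3 * y, 0)
--         if 2 * y == b:
--             t += 1
--         elif 2 * y < b:
--             t += g.get(6 * y, 0)
--         g[y] = t
--
--     def F(y):  # count from y in the unrestricted state, y > a
--         return 1 if y == b else (0 if y > b else g[y])
--
--     # walk the chain of consecutive *2 steps (k increments along it)
--     total, x, j = 0, a, k
--     while x < b and j != 1:
--         total += F(x + 1) + F(3 * x)
--         x *= 2
--         j += 1
--     if x == b:
--         total += 1
--     elif x < b:  # j == 1: only *3 is allowed
--         total += F(3 * x)
--     return total
-- ===== Notes on version B (the rewrite author's own statement) =====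
-- stated objective: faster
-- what changed: Replaces A's exponential recursion by a bottom-up dict of the k=0 count for every value in (a,b] plus a short walk along the chain of consecutive *2 steps (where k increments), so each state is computed once.
-- outside the precondition, e.g. on f(1000000, 1000950, 0): A returns 1, B returns 1
import Mathlib
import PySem

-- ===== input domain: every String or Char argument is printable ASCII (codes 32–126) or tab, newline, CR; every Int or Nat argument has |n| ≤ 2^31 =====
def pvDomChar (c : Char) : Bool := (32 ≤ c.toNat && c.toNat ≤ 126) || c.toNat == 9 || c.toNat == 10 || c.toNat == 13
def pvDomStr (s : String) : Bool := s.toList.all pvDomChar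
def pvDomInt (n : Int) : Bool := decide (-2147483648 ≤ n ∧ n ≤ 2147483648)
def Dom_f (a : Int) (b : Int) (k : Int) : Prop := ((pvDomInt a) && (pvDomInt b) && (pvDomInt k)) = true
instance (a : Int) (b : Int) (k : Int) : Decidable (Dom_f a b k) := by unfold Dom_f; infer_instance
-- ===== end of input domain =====

-- B replaces A's exponential recursion by a bottom-up table of the k=0 counting
-- function plus a walk along the *2 chain (objective: faster, asymptotic).

-- ===== PORT A =====
-- fuel-guarded transliteration of A's recursion; fuel (b-a).toNat+1 is always
-- sufficient on inputs where the Python terminates (a ≥ b, or 0 < a).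
def fA : Nat → Int → Int → Int → Int
  | 0, _, _, _ => 0
  | n+1, a, b, k =>
    if a = b then 1
    else if a > b then 0
    else if k = 1 then fA n (a*3) b (k-1)
    else fA n (a+1) b 0 + fA n (a*2) b (k+1) + fA n (a*3) b 0

def f (a : Int) (b : Int) (k : Int) : Int := fA ((b - a).toNat + 1) a b k

-- ===== PORT B =====
-- the dict-building loop of Source B: g[y] for y in (a, b)
def buildG (a : Int) (b : Int) : PySem.Dict Int Int :=
  (PySem.List.pyRange (b-1) a (-1)).foldl (fun g y =>
      g.insert y (PySem.Dict.getD g (y+1) 0 + PySem.Dict.getD g (3*y) 0 +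
        (if 2*y = b then 1 else if 2*y < b then PySem.Dict.getD g (6*y) 0 else 0)))
    ((PySem.Dict.empty).insert b 1)

-- Source B's helper F(y); Python's g[y] is getD here — under Pre_ the key is always present
def fF (g : PySem.Dict Int Int) (b : Int) (y : Int) : Int :=
  if y = b then 1 else if y > b then 0 else PySem.Dict.getD g y 0

-- Source B's while-loop over (total, x, j); fuel-guarded (the loop doubles x, so
-- (b-a).toNat+1 iterations always suffice on inputs where the Python terminates)
def chainB : Nat → PySem.Dict Int Int → Int → Int → Int → Int → Int
  | 0, _, _, total, _, _ => total
  | n+1, g, b, total, x, j =>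
    if x < b then
      (if j = 1 then total + fF g b (3*x)
       else chainB n g b (total + fF g b (x+1) + fF g b (3*x)) (x*2) (j+1))
    else if x = b then total + 1
    else total

def f_alt (a : Int) (b : Int) (k : Int) : Int :=
  if a = b then 1
  else if a > b then 0
  else chainB ((b - a).toNat + 1) (buildG a b) b 0 a k

-- ===== PRECONDITION & SPEC =====
-- Pre_ excludes (i) a ≤ 0 < b-a, where A's recursion never terminates (CPython: RecursionError),
-- and (ii) b - a ≥ 900 with a < b, where A's depth-(b-a) dive down the +1 chain overflows
-- CPython's default recursion limit (RecursionError); the 900 bound is slightly narrower than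
-- the exact limit, so a few deep-but-thin inputs on which A still returns are also excluded.
def Pre_f (a : Int) (b : Int) (k : Int) : Prop := b ≤ a ∨ (0 < a ∧ b - a < 900)
instance (a : Int) (b : Int) (k : Int) : Decidable (Pre_f a b k) := by unfold Pre_f; infer_instance
def pvWitness_f : Int × Int × Int := (1, 20, 0)

def Spec_f (a : Int) (b : Int) (k : Int) (out : Int) : Prop := out = f_alt a b k
instance (a : Int) (b : Int) (k : Int) (out : Int) : Decidable (Spec_f a b k out) := by unfold Spec_f; infer_instance

-- ===== CLAIM (what is proved, stated in full; the proofs are below) =====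
def Claim_equal_f : Prop := ∀ (a : Int) (b : Int) (k : Int), Dom_f a b k → Pre_f a b k → Spec_f a b k (f a b k)

-- ===== LEMMAS AND PROOFS =====

-- the mathematical value of A's k=0 state at y (with canonical sufficient fuel)
def Fv (b : Int) (y : Int) : Int := fA ((b - y).toNat + 1) y b 0

-- one-step unfolding of fA (controls unfolding where fuel is a syntactic successor)
theorem fA_succ (n : Nat) (a b k : Int) : fA (n+1) a b k =
    (if a = b then 1
     else if a > b then 0
     else if k = 1 then fA n (a*3) b (k-1)
     else fA n (a+1) b 0 + fA n (a*2) b (k+1) + fA n (a*3) b 0) := rfl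

-- fuel irrelevance: any two sufficient fuels give the same value (for 0 < a)
theorem fA_fuel (n : Nat) : ∀ (m : Nat) (a b k : Int), 0 < a → b - a < (n:Int) → b - a < (m:Int) →
    fA n a b k = fA m a b k := by
  induction n with
  | zero =>
    intro m a b k ha hn hm
    cases m with
    | zero => rfl
    | succ m => rw [fA_succ, if_neg (by omega : ¬ a = b), if_pos (by omega : a > b)]; rfl
  | succ n ih =>
    intro m a b k ha hn hm
    cases m with
    | zero =>
      rw [fA_succ, if_neg (by omega : ¬ a = b), if_pos (by omega : a > b)]; rfl
    | succ m =>
      rw [fA_succ n, fA_succ m]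
      by_cases h1 : a = b
      · rw [if_pos h1, if_pos h1]
      · rw [if_neg h1, if_neg h1]
        by_cases h2 : a > b
        · rw [if_pos h2, if_pos h2]
        · rw [if_neg h2, if_neg h2]
          by_cases h3 : k = 1
          · rw [if_pos h3, if_pos h3]
            exact ih m (a*3) b (k-1) (by omega) (by omega) (by omega)
          · rw [if_neg h3, if_neg h3,
                ih m (a+1) b 0 (by omega) (by omega) (by omega),
                ih m (a*2) b (k+1) (by omega) (by omega) (by omega),
                ih m (a*3) b 0 (by omega) (by omega) (by omega)]

theorem fA_eq_Fv {n : Nat} {b y : Int} (hy : 0 < y) (hn : b - y < (n:Int)) :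
    fA n y b 0 = Fv b y :=
  fA_fuel n ((b - y).toNat + 1) y b 0 hy hn (by omega)

theorem Fv_self (b : Int) : Fv b b = 1 := by
  rw [Fv, fA_succ, if_pos rfl]

theorem Fv_gt {b y : Int} (h : b < y) : Fv b y = 0 := by
  rw [Fv, fA_succ, if_neg (by omega : ¬ y = b), if_pos (by omega : y > b)]

-- A's recurrence for the k=0 state, written with the three children in B's grouping
theorem Fv_rec {b x : Int} (hx : 0 < x) (hxb : x < b) :
    Fv b x = Fv b (x+1) + Fv b (3*x) +
      (if 2*x = b then 1 else if 2*x < b then Fv b (6*x) else 0) := by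
  obtain ⟨m, hm⟩ : ∃ m, (b - x).toNat = m + 1 := ⟨(b - x).toNat - 1, by omega⟩
  rw [Fv, hm, fA_succ (m+1) x b 0, if_neg (by omega : ¬ x = b), if_neg (by omega : ¬ x > b),
      if_neg (by norm_num : ¬ (0:Int) = 1)]
  rw [fA_eq_Fv (by omega : (0:Int) < x + 1) (by omega : b - (x+1) < ((m+1 : Nat) : Int))]
  rw [fA_eq_Fv (by omega : (0:Int) < x * 3) (by omega : b - (x*3) < ((m+1 : Nat) : Int))]
  rw [fA_succ m (x*2) b (0+1)]
  by_cases h1 : x*2 = b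
  · rw [if_pos h1, if_pos (by omega : 2*x = b), (by ring : x*3 = 3*x)]
    ring
  · rw [if_neg h1, if_neg (by omega : ¬ 2*x = b)]
    by_cases h2 : x*2 > b
    · rw [if_pos h2, if_neg (by omega : ¬ 2*x < b), (by ring : x*3 = 3*x)]
      ring
    · rw [if_neg h2, if_pos (by norm_num : (0:Int) + 1 = 1), if_pos (by omega : 2*x < b),
          (by norm_num : (0:Int) + 1 - 1 = 0),
          fA_eq_Fv (by omega : (0:Int) < x*2*3) (by omega : b - (x*2*3) < ((m : Nat) : Int)),
          (by ring : x*2*3 = 6*x), (by ring : x*3 = 3*x)]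
      ring

-- invariant of B's table: keys are exactly [c, b], values are Fv
def InvG (b c : Int) (g : PySem.Dict Int Int) : Prop :=
  ∀ y : Int, g.get? y = if c ≤ y ∧ y ≤ b then some (Fv b y) else none

theorem getD_of_InvG {b c : Int} {g : PySem.Dict Int Int} (h : InvG b c g) (y : Int) :
    PySem.Dict.getD g y 0 = if c ≤ y ∧ y ≤ b then Fv b y else 0 := by
  rw [PySem.Dict.getD_eq_get?_getD, h y]
  by_cases hy : c ≤ y ∧ y ≤ b <;> simp [hy]

-- one step of the build loop preserves the invariant
theorem build_step {b c : Int} {g : PySem.Dict Int Int} (hc : 0 < c) (hcb : c < b)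
    (h : InvG b (c+1) g) :
    InvG b c (g.insert c (PySem.Dict.getD g (c+1) 0 + PySem.Dict.getD g (3*c) 0 +
      (if 2*c = b then 1 else if 2*c < b then PySem.Dict.getD g (6*c) 0 else 0))) := by
  have hv : PySem.Dict.getD g (c+1) 0 + PySem.Dict.getD g (3*c) 0 +
      (if 2*c = b then 1 else if 2*c < b then PySem.Dict.getD g (6*c) 0 else 0) = Fv b c := by
    rw [getD_of_InvG h (c+1), if_pos (by omega)]
    rw [getD_of_InvG h (3*c)]
    have h3 : (if c+1 ≤ 3*c ∧ 3*c ≤ b then Fv b (3*c) else 0) = Fv b (3*c) := by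
      by_cases h3b : 3*c ≤ b
      · rw [if_pos (by omega)]
      · rw [if_neg (by omega), Fv_gt (by omega)]
    rw [h3, Fv_rec hc hcb]
    by_cases h1 : 2*c = b
    · simp [h1]
    · by_cases h2 : 2*c < b
      · rw [if_neg h1, if_pos h2, if_neg h1, if_pos h2, getD_of_InvG h (6*c)]
        have h6 : (if c+1 ≤ 6*c ∧ 6*c ≤ b then Fv b (6*c) else 0) = Fv b (6*c) := by
          by_cases h6b : 6*c ≤ b
          · rw [if_pos (by omega)]
          · rw [if_neg (by omega), Fv_gt (by omega)]
        rw [h6]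
      · rw [if_neg h1, if_neg h2, if_neg h1, if_neg h2]
  rw [hv]
  intro y
  rw [PySem.Dict.get?_insert, h y]
  by_cases hyc : y = c
  · simp [hyc, (by omega : c ≤ c ∧ c ≤ b)]
  · rw [if_neg hyc]
    by_cases hy : c ≤ y ∧ y ≤ b
    · rw [if_pos (by omega), if_pos hy]
    · rw [if_neg (by omega), if_neg hy]

-- the whole build loop: folding down from c to a+1 turns InvG (c+1) into InvG (a+1)
theorem build_loop (b a : Int) (ha : 0 < a) :
    ∀ (n : Nat) (c : Int) (g : PySem.Dict Int Int), a ≤ c → c ≤ b - 1 → (c - a).toNat = n →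
      InvG b (c+1) g →
      InvG b (a+1) ((PySem.List.pyRange c a (-1)).foldl (fun g y =>
        g.insert y (PySem.Dict.getD g (y+1) 0 + PySem.Dict.getD g (3*y) 0 +
          (if 2*y = b then 1 else if 2*y < b then PySem.Dict.getD g (6*y) 0 else 0))) g) := by
  intro n
  induction n with
  | zero =>
    intro c g hac hcb hn hg
    have : c = a := by omega
    subst this
    rw [PySem.List.pyRange_neg_one_eq_nil le_rfl]
    simpa using hg
  | succ n ih =>
    intro c g hac hcb hn hg
    rw [PySem.List.pyRange_neg_one_cons (by omega : a < c), List.foldl_cons]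
    exact ih (c-1) _ (by omega) (by omega) (by omega)
      (by simpa using build_step (by omega) (by omega) hg)

-- the initial dict {b: 1} satisfies InvG b b
theorem InvG_init (b : Int) : InvG b b ((PySem.Dict.empty).insert b 1) := by
  intro y
  rw [PySem.Dict.get?_insert]
  by_cases hy : y = b
  · subst hy
    simp [Fv_self]
  · rw [if_neg hy, PySem.Dict.get?_empty, if_neg (by omega : ¬ (b ≤ y ∧ y ≤ b))]

theorem buildG_inv {a b : Int} (ha : 0 < a) (hab : a < b) : InvG b (a+1) (buildG a b) := by
  unfold buildG
  exact build_loop b a ha ((b-1) - a).toNat (b-1) _ (by omega) le_rfl rfl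
    (by simpa using InvG_init b)

-- Source B's F agrees with Fv on arguments > a
theorem fF_eq {a b : Int} {g : PySem.Dict Int Int} (hg : InvG b (a+1) g) {y : Int}
    (hy : a + 1 ≤ y) : fF g b y = Fv b y := by
  unfold fF
  by_cases h1 : y = b
  · simp [h1, Fv_self]
  · by_cases h2 : y > b
    · simp [h1, h2, Fv_gt h2]
    · rw [if_neg h1, if_neg h2, getD_of_InvG hg y, if_pos (by omega)]

-- the chain walk computes A's value at state (x, j), accumulated onto total
theorem chainB_eq {a b : Int} {g : PySem.Dict Int Int} (hg : InvG b (a+1) g) :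
    ∀ (n : Nat) (total x j : Int), 0 < x → a ≤ x → b - x < (n:Int) →
      chainB n g b total x j = total + fA n x b j := by
  intro n
  induction n with
  | zero =>
    intro total x j hx hax hn
    simp only [chainB, fA]
    omega
  | succ n ih =>
    intro total x j hx hax hn
    by_cases hxb : x < b
    · by_cases hj : j = 1
      · subst hj
        simp only [chainB, if_pos hxb, if_true]
        rw [fA_succ, if_neg (by omega : ¬ x = b), if_neg (by omega : ¬ x > b),
            if_pos rfl, (by norm_num : (1:Int) - 1 = 0), (by ring : x*3 = 3*x),
            fA_eq_Fv (by omega) (by omega : b - (3*x) < (n:Int)), fF_eq hg (by omega)]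
      · simp only [chainB, if_pos hxb, if_neg hj, fA, if_neg (by omega : ¬ x = b),
          if_neg (by omega : ¬ x > b)]
        rw [ih (total + fF g b (x+1) + fF g b (3*x)) (x*2) (j+1) (by omega) (by omega)
            (by omega)]
        rw [fF_eq hg (by omega : a + 1 ≤ x + 1), fF_eq hg (by omega : a + 1 ≤ 3*x),
            fA_eq_Fv (by omega) (by omega : b - (x+1) < (n:Int)), (by ring : x*3 = 3*x),
            fA_eq_Fv (by omega) (by omega : b - (3*x) < (n:Int))]
        ring
    · by_cases hxe : x = b
      · simp [chainB, hxe, fA]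
      · simp only [chainB, if_neg hxb, if_neg hxe, fA,
          if_pos (by omega : x > b)]
        omega

-- ===== VERDICT (by name: the statement is the Claim_ definition above) =====
theorem f_spec : Claim_equal_f := by
  unfold Claim_equal_f Spec_f
  intro a b k _ hpre
  by_cases h1 : a = b
  · simp [f, f_alt, fA, h1]
  · by_cases h2 : a > b
    · simp [f, f_alt, fA, h2, (by omega : ¬ (a = b))]
  -- wait: f needs unfolding with fuel ≥ 1
    · have hab : a < b := by omega
      have ha : 0 < a := by
        rcases hpre with h | h
        · omega
        · exact h.1
      have hg := buildG_inv ha hab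
      unfold f f_alt
      rw [if_neg h1, if_neg h2]
      rw [chainB_eq hg ((b-a).toNat + 1) 0 a k ha le_rfl (by omega)]
      omega
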